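-- pv_equiv track=rewrite | github.com/pnucse-capstone2025/Capstone-2025-team-33 | ai-server/test5/generate_dataset.py | get_color_compatibility_score
-- ===== SOURCE A (Python) =====
-- from itertools import combinations
--
-- color_compatibility = {
--     ('Red', 'Blue'): 5, ('Red', 'White'): 5, ('Red', 'Black'): 5, ('Blue', 'White'): 8,
--     ('Blue', 'Grey'): 6, ('Blue', 'Beige'): 6, ('Green', 'Beige'): 7, ('Green', 'Brown'): 7,
--     ('Black', 'White'): 10, ('Black', 'Grey'): 8, ('White', 'Beige'): 8, ('White', 'Grey'): 8,
-- }
--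
-- def get_color_compatibility_score(colors):
--     score = 0
--     unique_colors = list(set(colors))
--     if len(unique_colors) > 1:
--         for c1, c2 in combinations(unique_colors, 2):
--             pair = tuple(sorted((c1, c2)))
--             score += color_compatibility.get(pair, -2)
--     return score
-- ===== SOURCE B (Python) =====
-- color_compatibility = {
--     ('Red', 'Blue'): 5, ('Red', 'White'): 5, ('Red', 'Black'): 5, ('Blue', 'White'): 8,
--     ('Blue', 'Grey'): 6, ('Blue', 'Beige'): 6, ('Green', 'Beige'): 7, ('Green', 'Brown'): 7,
--     ('Black', 'White'): 10, ('Black', 'Grey'): 8, ('White', 'Beige'): 8, ('White', 'Grey'): 8,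
-- }
--
-- def get_color_compatibility_score(colors):
--     uniq = set(colors)
--     n = len(uniq)
--     if n <= 1:
--         return 0
--     # every unordered pair contributes -2 unless a sorted table key matches it
--     score = -(n * (n - 1))
--     for (a, b), v in color_compatibility.items():
--         if a < b and a in uniq and b in uniq:
--             score += v + 2
--     return score
-- ===== Notes on version B (the rewrite author's own statement) =====
-- stated objective: faster
-- what changed: B replaces A's enumeration of all C(n,2) unique-color pairs with a closed-form -2*C(n,2) baseline plus one pass over the 12 fixed table entries, adding v+2 for each sorted-key entry whose two colors are both present.
import Mathlib
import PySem

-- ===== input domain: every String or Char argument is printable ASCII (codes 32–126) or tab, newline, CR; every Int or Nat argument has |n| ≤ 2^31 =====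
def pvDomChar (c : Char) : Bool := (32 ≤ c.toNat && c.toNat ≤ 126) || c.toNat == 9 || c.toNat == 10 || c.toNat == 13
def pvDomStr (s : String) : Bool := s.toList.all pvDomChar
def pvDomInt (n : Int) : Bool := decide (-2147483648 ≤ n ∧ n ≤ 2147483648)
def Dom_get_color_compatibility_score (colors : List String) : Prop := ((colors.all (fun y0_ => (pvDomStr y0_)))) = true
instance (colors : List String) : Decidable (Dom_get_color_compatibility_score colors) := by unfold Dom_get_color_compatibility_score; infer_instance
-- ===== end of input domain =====

-- B replaces A's pair enumeration by a closed-form -2*C(n,2) baseline plus one pass over the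
-- fixed compatibility table (objective: faster, O(n) vs O(n^2) in the number of distinct colors).

-- ===== PORT A =====
-- the module-level dict color_compatibility
def colorCompatibility : PySem.Dict (String × String) Int :=
  PySem.Dict.ofList
    [ (("Red", "Blue"), 5), (("Red", "White"), 5), (("Red", "Black"), 5), (("Blue", "White"), 8),
      (("Blue", "Grey"), 6), (("Blue", "Beige"), 6), (("Green", "Beige"), 7), (("Green", "Brown"), 7),
      (("Black", "White"), 10), (("Black", "Grey"), 8), (("White", "Beige"), 8), (("White", "Grey"), 8) ]

def get_color_compatibility_score (colors : List String) : Int :=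
  let unique_colors : PySem.Set String := PySem.Set.ofList colors
  if unique_colors.length > 1 then
    (PySem.List.combinations unique_colors 2).foldl
      (fun score c =>
        match c with
        | [c1, c2] =>
          -- tuple(sorted((c1, c2))) : exact for two elements (stable sort swaps iff c2 < c1)
          let pair := if c2 < c1 then (c2, c1) else (c1, c2)
          score + colorCompatibility.getD pair (-2)
        | _ => score) 0
  else 0

-- ===== PORT B =====
def get_color_compatibility_score_alt (colors : List String) : Int :=
  let uniq : PySem.Set String := PySem.Set.ofList colors
  let n : Int := uniq.length
  if n ≤ 1 then 0
  else
    colorCompatibility.items.foldl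
      (fun score kv =>
        if kv.1.1 < kv.1.2 ∧ kv.1.1 ∈ uniq ∧ kv.1.2 ∈ uniq then score + kv.2 + 2 else score)
      (-(n * (n - 1)))

-- ===== PRECONDITION & SPEC =====
def Spec_get_color_compatibility_score (colors : List String) (out : Int) : Prop := out = get_color_compatibility_score_alt colors
instance (colors : List String) (out : Int) : Decidable (Spec_get_color_compatibility_score colors out) := by unfold Spec_get_color_compatibility_score; infer_instance

-- ===== CLAIM (what is proved, stated in full; the proofs are below) =====
def Claim_equal_get_color_compatibility_score : Prop := ∀ (colors : List String), Dom_get_color_compatibility_score colors → Spec_get_color_compatibility_score colors (get_color_compatibility_score colors)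

-- ===== LEMMAS AND PROOFS =====

-- per-pair contribution in A's loop
def pvG (c : List String) : Int :=
  match c with
  | [c1, c2] => colorCompatibility.getD (if c2 < c1 then (c2, c1) else (c1, c2)) (-2)
  | _ => 0

-- per-table-entry contribution in B's loop, for a given distinct-color list u
def pvD (kv : (String × String) × Int) (u : List String) : Int :=
  if kv.1.1 < kv.1.2 ∧ kv.1.1 ∈ u ∧ kv.1.2 ∈ u then kv.2 + 2 else 0

lemma pvTable_items : colorCompatibility.items =
    [ (("Red", "Blue"), 5), (("Red", "White"), 5), (("Red", "Black"), 5), (("Blue", "White"), 8),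
      (("Blue", "Grey"), 6), (("Blue", "Beige"), 6), (("Green", "Beige"), 7), (("Green", "Brown"), 7),
      (("Black", "White"), 10), (("Black", "Grey"), 8), (("White", "Beige"), 8), (("White", "Grey"), 8) ] := by
  decide

lemma sum_zero_of_no_key (l : List ((String × String) × Int)) (q : String × String)
    (h : q ∉ l.map Prod.fst) :
    (l.map (fun kv => if kv.1 = q then kv.2 + 2 else 0)).sum = 0 := by
  induction l with
  | nil => simp
  | cons kv t ih =>
    simp only [List.map_cons, List.mem_cons, List.sum_cons] at *
    rw [not_or] at h
    rw [if_neg (by exact fun hq => h.1 (by rw [hq])), ih h.2]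
    ring

lemma getD_plus_two_eq_sum (l : List ((String × String) × Int)) (q : String × String)
    (h : (l.map Prod.fst).Nodup) :
    ((PySem.Dict.mk l).getD q (-2)) + 2
      = (l.map (fun kv => if kv.1 = q then kv.2 + 2 else 0)).sum := by
  induction l with
  | nil => simp [PySem.Dict.getD, PySem.Dict.get?]
  | cons kv t ih =>
    simp only [List.map_cons, List.nodup_cons, List.sum_cons] at *
    by_cases hq : kv.1 = q
    · subst hq
      rw [if_pos rfl, sum_zero_of_no_key t kv.1 h.1]
      simp [PySem.Dict.getD, PySem.Dict.get?]
    · rw [if_neg hq]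
      rw [show ((PySem.Dict.mk (kv :: t)).getD q (-2)) = ((PySem.Dict.mk t).getD q (-2)) from by
        simp [PySem.Dict.getD, PySem.Dict.get?, beq_iff_eq, hq]]
      rw [ih h.2]
      ring

lemma sum_map_add_int {α : Type} (l : List α) (f g : α → Int) :
    (l.map (fun x => f x + g x)).sum = (l.map f).sum + (l.map g).sum := by
  induction l with
  | nil => simp
  | cons a t ih => simp [ih]; ring

lemma sum_map_sub_int {α : Type} (l : List α) (f g : α → Int) :
    (l.map (fun x => f x - g x)).sum = (l.map f).sum - (l.map g).sum := by
  induction l with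
  | nil => simp
  | cons a t ih => simp [ih]; ring

lemma sum_swap_int {α β : Type} (xs : List α) (l : List β) (F : α → β → Int) :
    (xs.map (fun y => (l.map (F y)).sum)).sum = (l.map (fun kv => (xs.map (fun y => F y kv)).sum)).sum := by
  induction xs with
  | nil => simp
  | cons a t ih =>
    simp only [List.map_cons, List.sum_cons, ih]
    rw [← sum_map_add_int]

lemma sum_const_int {α : Type} (xs : List α) (c : Int) :
    (xs.map (fun _ => c)).sum = c * xs.length := by
  induction xs with
  | nil => simp
  | cons a t ih => simp only [List.map_cons, List.sum_cons, List.length_cons, ih]; push_cast; ring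

lemma sum_single (xs : List String) (hnd : xs.Nodup) (b : String) (c : Int) :
    (xs.map (fun y => if y = b then c else 0)).sum = if b ∈ xs then c else 0 := by
  induction xs with
  | nil => simp
  | cons a t ih =>
    simp only [List.nodup_cons] at hnd
    by_cases hab : a = b
    · subst hab
      simp only [List.map_cons, List.sum_cons, List.mem_cons, true_or, if_pos]
      rw [List.sum_eq_zero, add_zero]
      intro z hz
      simp only [List.mem_map] at hz
      obtain ⟨y, hy, rfl⟩ := hz
      rw [if_neg (fun h => hnd.1 (by rw [← h]; exact hy))]
    · have hba : ¬ b = a := fun h => hab h.symm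
      simp [hab, hba, ih hnd.2]

lemma sortpair_eq (a b x y : String) (hab : a < b) :
    (((a, b) : String × String) = if y < x then (y, x) else (x, y)) ↔ (x = a ∧ y = b) ∨ (x = b ∧ y = a) := by
  by_cases hyx : y < x
  · rw [if_pos hyx, Prod.mk.injEq]
    constructor
    · rintro ⟨rfl, rfl⟩; right; exact ⟨rfl, rfl⟩
    · rintro (⟨rfl, rfl⟩ | ⟨rfl, rfl⟩)
      · exact absurd hyx (asymm hab)
      · exact ⟨rfl, rfl⟩
  · rw [if_neg hyx, Prod.mk.injEq]
    constructor
    · rintro ⟨rfl, rfl⟩; left; exact ⟨rfl, rfl⟩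
    · rintro (⟨rfl, rfl⟩ | ⟨rfl, rfl⟩)
      · exact ⟨rfl, rfl⟩
      · exact absurd hab hyx

-- the per-entry counting step: adding a fresh color x to xs changes entry kv's contribution
lemma indicator_lemma (kv : (String × String) × Int) (x : String) (xs : List String)
    (hnd : xs.Nodup) (hx : x ∉ xs) :
    (xs.map (fun y => if kv.1 = (if y < x then (y, x) else (x, y)) then kv.2 + 2 else 0)).sum
      = pvD kv (x :: xs) - pvD kv xs := by
  obtain ⟨⟨a, b⟩, v⟩ := kv
  simp only [pvD]
  by_cases hab : a < b
  · have hba : b ≠ a := (ne_of_lt hab).symm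
    by_cases hxa : x = a
    · subst hxa
      have hm : xs.map (fun y => if ((x, b) : String × String) = (if y < x then (y, x) else (x, y)) then v + 2 else 0)
              = xs.map (fun y => if y = b then v + 2 else 0) := by
        refine List.map_congr_left (fun y _ => ?_)
        have hiff : (((x, b) : String × String) = if y < x then (y, x) else (x, y)) ↔ y = b := by
          rw [sortpair_eq x b x y hab]
          constructor
          · rintro (⟨_, h⟩ | ⟨h, _⟩)
            · exact h
            · exact absurd h.symm hba
          · intro h; left; exact ⟨rfl, h⟩
        simp only [hiff]
      rw [hm, sum_single xs hnd b (v + 2)]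
      by_cases hb : b ∈ xs <;>
        simp [hab, hx, hb, hba, List.mem_cons]
    · by_cases hxb : x = b
      · subst hxb
        have hax : a ≠ x := fun h => hxa h.symm
        have hm : xs.map (fun y => if ((a, x) : String × String) = (if y < x then (y, x) else (x, y)) then v + 2 else 0)
                = xs.map (fun y => if y = a then v + 2 else 0) := by
          refine List.map_congr_left (fun y _ => ?_)
          have hiff : (((a, x) : String × String) = if y < x then (y, x) else (x, y)) ↔ y = a := by
            rw [sortpair_eq a x x y hab]
            constructor
            · rintro (⟨h, _⟩ | ⟨_, h⟩)
              · exact absurd h hxa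
              · exact h
            · intro h; right; exact ⟨rfl, h⟩
          simp only [hiff]
        rw [hm, sum_single xs hnd a (v + 2)]
        by_cases ha : a ∈ xs <;>
          simp [hab, hx, ha, hax, List.mem_cons]
      · have ha' : (a ∈ x :: xs) ↔ a ∈ xs :=
          ⟨fun h => (List.mem_cons.mp h).resolve_left (fun h' => hxa h'.symm),
           fun h => List.mem_cons.mpr (Or.inr h)⟩
        have hb' : (b ∈ x :: xs) ↔ b ∈ xs :=
          ⟨fun h => (List.mem_cons.mp h).resolve_left (fun h' => hxb h'.symm),
           fun h => List.mem_cons.mpr (Or.inr h)⟩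
        rw [List.sum_eq_zero]
        · simp only [ha', hb']; ring
        · intro z hz
          simp only [List.mem_map] at hz
          obtain ⟨y, _, rfl⟩ := hz
          rw [if_neg]
          intro h
          rcases (sortpair_eq a b x y hab).mp h with ⟨h1, _⟩ | ⟨h1, _⟩
          · exact hxa h1
          · exact hxb h1
  · rw [if_neg (fun h => hab h.1), if_neg (fun h => hab h.1), List.sum_eq_zero]
    · ring
    · intro z hz
      simp only [List.mem_map] at hz
      obtain ⟨y, hy, rfl⟩ := hz
      have hxy : x ≠ y := fun h => hx (h ▸ hy)
      rw [if_neg]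
      intro h
      by_cases hyx : y < x
      · rw [if_pos hyx, Prod.mk.injEq] at h
        exact hab (h.1 ▸ h.2 ▸ hyx)
      · rw [if_neg hyx, Prod.mk.injEq] at h
        exact hab (h.1 ▸ h.2 ▸ lt_of_le_of_ne (not_lt.mp hyx) hxy)

lemma master (u : List String) (hu : u.Nodup) :
    ((PySem.List.combinations u 2).map pvG).sum
      = (colorCompatibility.items.map (fun kv => pvD kv u)).sum
          - (u.length : Int) * ((u.length : Int) - 1) := by
  induction u with
  | nil =>
    rw [show PySem.List.combinations ([] : List String) 2 = [] from rfl]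
    rw [List.sum_eq_zero (l := colorCompatibility.items.map fun kv => pvD kv [])]
    · norm_num
    · intro z hz
      simp only [List.mem_map] at hz
      obtain ⟨kv, _, rfl⟩ := hz
      simp [pvD]
  | cons x xs ih =>
    obtain ⟨hx, hnd⟩ := List.nodup_cons.mp hu
    rw [show PySem.List.combinations (x :: xs) 2
          = (PySem.List.combinations xs 1).map (x :: ·) ++ PySem.List.combinations xs (1 + 1)
        from PySem.List.combinations_cons_succ x xs 1]
    rw [PySem.List.combinations_one, show (1 : Nat) + 1 = 2 from rfl]
    rw [List.map_append, List.sum_append, List.map_map, List.map_map]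
    have hGg : xs.map ((pvG ∘ (x :: ·)) ∘ fun y => [y])
        = xs.map (fun y => (-2 : Int) +
            (colorCompatibility.items.map (fun kv =>
              if kv.1 = (if y < x then (y, x) else (x, y)) then kv.2 + 2 else 0)).sum) := by
      refine List.map_congr_left (fun y _ => ?_)
      have h2 := getD_plus_two_eq_sum colorCompatibility.items
        (if y < x then (y, x) else (x, y)) (by rw [pvTable_items]; decide)
      have hGD : ((pvG ∘ (x :: ·)) ∘ fun y => [y]) y
          = colorCompatibility.getD (if y < x then (y, x) else (x, y)) (-2) := by
        simp [pvG]
      rw [hGD]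
      rw [show PySem.Dict.mk colorCompatibility.items = colorCompatibility from rfl] at h2
      omega
    rw [hGg, sum_map_add_int xs (fun _ => (-2 : Int)) _, sum_const_int,
        sum_swap_int xs colorCompatibility.items
          (fun y kv => if kv.1 = (if y < x then (y, x) else (x, y)) then kv.2 + 2 else 0),
        List.map_congr_left (fun kv _ => indicator_lemma kv x xs hnd hx),
        sum_map_sub_int, ih hnd]
    push_cast [List.length_cons]
    ring

-- ===== VERDICT (by name: the statement is the Claim_ definition above) =====
theorem get_color_compatibility_score_spec : Claim_equal_get_color_compatibility_score := by
  intro colors _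
  unfold Spec_get_color_compatibility_score
  simp only [get_color_compatibility_score, get_color_compatibility_score_alt]
  have hnd : (PySem.Set.ofList colors).Nodup := PySem.Set.nodup_ofList colors
  set u := PySem.Set.ofList colors with hu
  by_cases hlen : u.length > 1
  · rw [if_pos hlen, if_neg (by omega)]
    have hA : (fun (score : Int) c =>
        match c with
        | [c1, c2] => score + colorCompatibility.getD (if c2 < c1 then (c2, c1) else (c1, c2)) (-2)
        | _ => score) = fun (score : Int) c => score + pvG c := by
      funext score c
      match c with
      | [] => simp [pvG]
      | [c1] => simp [pvG]
      | [c1, c2] => simp [pvG]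
      | c1 :: c2 :: c3 :: t => simp [pvG]
    have hB : (fun (score : Int) kv =>
        if kv.1.1 < kv.1.2 ∧ kv.1.1 ∈ u ∧ kv.1.2 ∈ u then score + kv.2 + 2 else score)
        = fun (score : Int) kv => score + pvD kv u := by
      funext score kv
      by_cases h : kv.1.1 < kv.1.2 ∧ kv.1.1 ∈ u ∧ kv.1.2 ∈ u
      · rw [if_pos h]; simp only [pvD, if_pos h]; ring
      · rw [if_neg h]; simp only [pvD, if_neg h]; ring
    rw [hA, hB, PySem.List.foldl_add, PySem.List.foldl_add, master u hnd]
    ring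
  · rw [if_neg hlen, if_pos (by omega)]
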